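-- pv_equiv track=rewrite | github.com/GirishJoshi/interviewcake | Greedy algorithms/highest_product_of_3.py | highest_product_of_4
-- ===== SOURCE A (Python) =====
-- def highest_product_of_4(list_of_ints):
--
--     if len(list_of_ints) < 4:
--         raise ValueError("Need atleast 4 values.")
--
--     max_prod_4 = list_of_ints[0] * list_of_ints[1] * list_of_ints[2] * list_of_ints[3]
--     high_prod_3 = list_of_ints[0] * list_of_ints[1] * list_of_ints[2]
--     low_prod_3 = list_of_ints[0] * list_of_ints[1] * list_of_ints[2]
--     high_prod_2 = list_of_ints[0] * list_of_ints[1]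
--     low_prod_2 = list_of_ints[0] * list_of_ints[1]
--
--     high = max(list_of_ints[0], list_of_ints[1])
--     low = min(list_of_ints[0], list_of_ints[1])
--
--     for num in list_of_ints[2:]:
--
--         max_prod_4 = max(max_prod_4, high_prod_3 * num, low_prod_3 * num)
--
--         high_prod_3 = max(high_prod_3, high_prod_2 * num, low_prod_2 * num)
--         low_prod_3 = min(low_prod_3, high_prod_2 * num, low_prod_2 * num)
--
--         high_prod_2 = max(high_prod_2, high * num, low * num)
--         low_prod_2 = min(low_prod_2, high * num, low * num)
--
--         high = max(high, num)
--         low = min(low, num)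
--
--     return max_prod_4
-- ===== SOURCE B (Python) =====
-- def highest_product_of_4(list_of_ints):
--     if len(list_of_ints) < 4:
--         raise ValueError("Need atleast 4 values.")
--     x, y, z, w = list_of_ints[:4]
--     nums = list_of_ints[2:]
--     # staged evaluation: tabulate the running (max, min) products of 1, 2 and 3
--     # factors in three passes, then reduce to the best 4-factor product.
--     ext1 = [(max(x, y), min(x, y))]
--     for num in nums:
--         hi, lo = ext1[-1]
--         ext1.append((max(hi, num), min(lo, num)))
--     ext2 = [(x * y, x * y)]
--     for (hi, lo), num in zip(ext1, nums):
--         phi, plo = ext2[-1]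
--         ext2.append((max(phi, hi * num, lo * num), min(plo, hi * num, lo * num)))
--     ext3 = [(x * y * z, x * y * z)]
--     for (hi, lo), num in zip(ext2, nums):
--         phi, plo = ext3[-1]
--         ext3.append((max(phi, hi * num, lo * num), min(plo, hi * num, lo * num)))
--     best = x * y * z * w
--     for (hi, lo), num in zip(ext3, nums):
--         best = max(best, hi * num, lo * num)
--     return best
-- ===== Notes on version B (the rewrite author's own statement) =====
-- stated objective: alternative
-- what changed: Restructures the fused single-pass recurrence with seven scalar running variables into a staged evaluation: three passes tabulate the running (max,min) products of 1, 2 and 3 factors as lists, and a final reduce pass extracts the best 4-factor product; same recurrence, different traversal and data structure (a sort-based rewrite cannot reproduce this function's established value, which also admits the seeded candidate list[0]*list[1]*list[2]**2).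
import Mathlib
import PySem

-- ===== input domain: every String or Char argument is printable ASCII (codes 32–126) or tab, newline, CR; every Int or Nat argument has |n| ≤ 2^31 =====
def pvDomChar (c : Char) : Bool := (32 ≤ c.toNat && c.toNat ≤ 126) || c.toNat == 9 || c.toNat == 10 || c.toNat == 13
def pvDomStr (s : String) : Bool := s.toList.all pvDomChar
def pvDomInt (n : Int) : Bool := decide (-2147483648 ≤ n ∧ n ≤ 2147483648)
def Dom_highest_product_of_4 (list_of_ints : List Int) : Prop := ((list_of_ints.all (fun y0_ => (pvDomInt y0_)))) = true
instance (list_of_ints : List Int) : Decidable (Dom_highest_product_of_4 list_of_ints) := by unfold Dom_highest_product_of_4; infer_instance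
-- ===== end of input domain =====

-- B restructures A's fused single-pass recurrence (seven scalar running variables) into a
-- staged evaluation: three passes tabulate the running (max,min) products of 1, 2 and 3
-- factors as lists, then a final reduce pass extracts the returned 4-factor maximum; same
-- recurrence, different traversal and data structure. Neither program mutates its argument;
-- on lists shorter than 4 both raise the same ValueError (outside Pre_).

-- ===== PORT A =====
-- loop body of A (sequential reassignments: each line uses the values as of that line)
def pvStepA (st : Int × Int × Int × Int × Int × Int × Int) (num : Int) :
    Int × Int × Int × Int × Int × Int × Int :=
  let mp4 := st.1; let hp3 := st.2.1; let lp3 := st.2.2.1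
  let hp2 := st.2.2.2.1; let lp2 := st.2.2.2.2.1
  let high := st.2.2.2.2.2.1; let low := st.2.2.2.2.2.2
  (max (max mp4 (hp3 * num)) (lp3 * num),
   max (max hp3 (hp2 * num)) (lp2 * num),
   min (min lp3 (hp2 * num)) (lp2 * num),
   max (max hp2 (high * num)) (low * num),
   min (min lp2 (high * num)) (low * num),
   max high num,
   min low num)

def highest_product_of_4 (list_of_ints : List Int) : Int :=
  match list_of_ints with
  | x0 :: x1 :: x2 :: x3 :: _ =>
      -- for num in list_of_ints[2:]
      ((list_of_ints.drop 2).foldl pvStepA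
        (x0 * x1 * x2 * x3, x0 * x1 * x2, x0 * x1 * x2, x0 * x1, x0 * x1,
         max x0 x1, min x0 x1)).1
  | _ => 0  -- len < 4: Python raises ValueError("Need atleast 4 values."); excluded by Pre_

-- ===== PORT B =====
-- pass 1 of Source B: the list ext1 of running (max, min) single elements (append-loop as recursion)
def pvRun1 (st : Int × Int) : List Int → List (Int × Int)
  | [] => [st]
  | n :: ns => st :: pvRun1 (max st.1 n, min st.2 n) ns

-- passes 2 and 3 of Source B: ext2 / ext3 from the zipped previous table (same loop shape)
def pvRun2 (st : Int × Int) : List ((Int × Int) × Int) → List (Int × Int)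
  | [] => [st]
  | (p, n) :: rest =>
      st :: pvRun2 (max (max st.1 (p.1 * n)) (p.2 * n),
                    min (min st.2 (p.1 * n)) (p.2 * n)) rest

-- final reduce pass of Source B
def pvFinal (best : Int) : List ((Int × Int) × Int) → Int
  | [] => best
  | (p, n) :: rest => pvFinal (max (max best (p.1 * n)) (p.2 * n)) rest

def highest_product_of_4_alt (list_of_ints : List Int) : Int :=
  if list_of_ints.length < 4 then 0  -- ValueError in Source B; excluded by Pre_
  else
    -- x, y, z, w = list_of_ints[:4]
    let x := PySem.List.pyGetD list_of_ints 0 0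
    let y := PySem.List.pyGetD list_of_ints 1 0
    let z := PySem.List.pyGetD list_of_ints 2 0
    let w := PySem.List.pyGetD list_of_ints 3 0
    let nums := list_of_ints.drop 2
    let ext1 := pvRun1 (max x y, min x y) nums
    let ext2 := pvRun2 (x * y, x * y) (ext1.zip nums)
    let ext3 := pvRun2 (x * y * z, x * y * z) (ext2.zip nums)
    pvFinal (x * y * z * w) (ext3.zip nums)

-- ===== PRECONDITION & SPEC =====
-- Python A raises ValueError exactly when len(list_of_ints) < 4 (and so does B).
def Pre_highest_product_of_4 (list_of_ints : List Int) : Prop := 4 ≤ list_of_ints.length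
instance (list_of_ints : List Int) : Decidable (Pre_highest_product_of_4 list_of_ints) := by
  unfold Pre_highest_product_of_4; infer_instance

def pvWitness_highest_product_of_4 : List Int := [2, -7, 5, 0, 3]

def Spec_highest_product_of_4 (list_of_ints : List Int) (out : Int) : Prop :=
  out = highest_product_of_4_alt list_of_ints
instance (list_of_ints : List Int) (out : Int) : Decidable (Spec_highest_product_of_4 list_of_ints out) := by
  unfold Spec_highest_product_of_4; infer_instance

-- ===== CLAIM (what is proved, stated in full; the proof is below) =====
def Claim_equal_highest_product_of_4 : Prop := ∀ (list_of_ints : List Int), Dom_highest_product_of_4 list_of_ints → Pre_highest_product_of_4 list_of_ints → Spec_highest_product_of_4 list_of_ints (highest_product_of_4 list_of_ints)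

-- ===== LEMMAS AND PROOFS =====

-- the staged pipeline computes the first component of A's fused fold, for any seeds
theorem pvStaged_eq (nums : List Int) : ∀ (r h3 l3 h2 l2 h1 l1 : Int),
    pvFinal r ((pvRun2 (h3, l3)
        ((pvRun2 (h2, l2) ((pvRun1 (h1, l1) nums).zip nums)).zip nums)).zip nums) =
      (nums.foldl pvStepA (r, h3, l3, h2, l2, h1, l1)).1 := by
  induction nums with
  | nil => intro r h3 l3 h2 l2 h1 l1; rfl
  | cons n ns ih =>
      intro r h3 l3 h2 l2 h1 l1
      simp only [pvRun1, pvRun2, pvFinal, List.zip_cons_cons, List.foldl_cons]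
      exact ih _ _ _ _ _ _ _

-- ===== VERDICT (by name: the statement is the Claim_ definition above) =====
theorem highest_product_of_4_spec : Claim_equal_highest_product_of_4 := by
  unfold Claim_equal_highest_product_of_4
  intro l _hdom hpre
  unfold Spec_highest_product_of_4
  rcases l with _ | ⟨x, l⟩; · exact absurd hpre (by simp [Pre_highest_product_of_4])
  rcases l with _ | ⟨y, l⟩; · exact absurd hpre (by simp [Pre_highest_product_of_4])
  rcases l with _ | ⟨z, l⟩; · exact absurd hpre (by simp [Pre_highest_product_of_4])
  rcases l with _ | ⟨w, rest⟩; · exact absurd hpre (by simp [Pre_highest_product_of_4])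
  show _ = highest_product_of_4_alt (x :: y :: z :: w :: rest)
  unfold highest_product_of_4 highest_product_of_4_alt
  rw [if_neg (by simp)]
  simp only [PySem.List.pyGetD_ofNat', List.getD_cons_zero, List.getD_cons_succ]
  exact (pvStaged_eq _ _ _ _ _ _ _ _).symm
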